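-- pv_equiv track=rewrite | github.com/PerJenelius/advent_of_code | 2024/dec_07_b/app.py | update_operator_key
-- ===== SOURCE A (Python) =====
-- def update_operator_key(old_key: str):
--     new_key = ""
--     runover = False
--     for index in range(len(old_key)):
--         old_char = int(old_key[index])
--         new_char = old_char
--         if runover or index == 0:
--             new_char = old_char - 1
--             runover = False
--         if new_char < 0:
--             new_char = 2
--             runover = True
--         new_key += str(new_char)
--     is_zero = True
--     for char in new_key:
--         if char != "0":
--             is_zero = False
--     if is_zero:
--         return "0"
--     else:
--         return new_key
-- ===== SOURCE B (Python) =====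
-- def update_operator_key(old_key: str):
--     i = 0
--     while i < len(old_key) and old_key[i] == "0":
--         i += 1
--     if i == len(old_key):
--         new_key = "2" * len(old_key)
--     else:
--         new_key = "2" * i + str(int(old_key[i]) - 1) + old_key[i + 1:]
--     if all(c == "0" for c in new_key):
--         return "0"
--     return new_key
-- ===== Notes on version B (the rewrite author's own statement) =====
-- stated objective: simpler
-- what changed: Replaced the per-character borrow-flag loop that rebuilds the string digit by digit with a direct construction: find the first non-'0' character, emit that many '2's, the decremented digit, and the untouched tail.
import Mathlib
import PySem

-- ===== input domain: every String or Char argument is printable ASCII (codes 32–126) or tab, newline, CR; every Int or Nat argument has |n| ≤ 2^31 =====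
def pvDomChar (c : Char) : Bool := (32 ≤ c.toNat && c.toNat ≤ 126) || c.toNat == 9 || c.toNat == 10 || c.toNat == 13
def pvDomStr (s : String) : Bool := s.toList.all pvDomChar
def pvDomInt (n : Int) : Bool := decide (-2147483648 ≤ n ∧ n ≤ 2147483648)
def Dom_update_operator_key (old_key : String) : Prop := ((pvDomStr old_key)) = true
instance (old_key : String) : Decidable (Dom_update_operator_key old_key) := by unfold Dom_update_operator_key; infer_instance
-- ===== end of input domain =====

-- B replaces A's per-character borrow-flag loop by a direct construction ('2'*i ++ decremented first
-- non-'0' digit ++ untouched tail); equivalence is about the return value, same cost, simpler shape.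

-- ===== PORT A =====
-- int(c) for a one-character string; exact on the digit strings admitted by Pre_.
def pvDigitVal (c : Char) : Int := (PySem.Int.ofStr? (String.ofList [c])).getD 0

-- one iteration of A's for-loop; state = (new_key as char list, runover)
def pvAStep (st : List Char × Bool) (p : Int × Char) : List Char × Bool :=
  let old_char := pvDigitVal p.2
  let s1 : Int × Bool := if st.2 || decide (p.1 = 0) then (old_char - 1, false) else (old_char, st.2)
  let s2 : Int × Bool := if s1.1 < 0 then ((2 : Int), true) else s1
  (st.1 ++ PySem.Int.toChars s2.1, s2.2)

def update_operator_key (old_key : String) : String :=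
  let st := (PySem.List.enumerate old_key.toList 0).foldl pvAStep ([], false)
  let is_zero := st.1.foldl (fun b c => if c ≠ '0' then false else b) true
  if is_zero then "0" else String.ofList st.1

-- ===== PORT B =====
-- B's new_key: '2' * i ++ str(int(cs[i]) - 1) ++ cs[i+1:], or all '2's when no non-'0' char exists
def pvBNew (cs : List Char) : List Char :=
  match cs.findIdx? (· ≠ '0') with
  | none => List.replicate cs.length '2'
  | some i => List.replicate i '2' ++ PySem.Int.toChars (pvDigitVal (cs.getD i '0') - 1) ++ cs.drop (i + 1)

def update_operator_key_alt (old_key : String) : String :=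
  let new_key := pvBNew old_key.toList
  if new_key.all (· == '0') then "0" else String.ofList new_key

-- ===== PRECONDITION & SPEC =====
-- A raises ValueError (int(c)) on any non-digit character; Pre_ admits exactly the digit strings.
def Pre_update_operator_key (old_key : String) : Prop :=
  (old_key.toList.all (fun c => c ∈ ['0','1','2','3','4','5','6','7','8','9'])) = true
instance (old_key : String) : Decidable (Pre_update_operator_key old_key) := by
  unfold Pre_update_operator_key; infer_instance

def pvWitness_update_operator_key : String := "1200"

def Spec_update_operator_key (old_key : String) (out : String) : Prop := out = update_operator_key_alt old_key
instance (old_key : String) (out : String) : Decidable (Spec_update_operator_key old_key out) := by unfold Spec_update_operator_key; infer_instance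

-- ===== CLAIM (what is proved, stated in full; the proofs are below) =====
def Claim_equal_update_operator_key : Prop := ∀ (old_key : String), Dom_update_operator_key old_key → Pre_update_operator_key old_key → Spec_update_operator_key old_key (update_operator_key old_key)

-- ===== LEMMAS AND PROOFS =====

def pvIsDigit (c : Char) : Prop := c ∈ ['0','1','2','3','4','5','6','7','8','9']

theorem pvDigit_roundtrip {c : Char} (h : pvIsDigit c) :
    PySem.Int.toChars (pvDigitVal c) = [c] ∧ ¬ pvDigitVal c < 0 := by
  unfold pvIsDigit at h
  simp only [List.mem_cons, List.not_mem_nil, or_false] at h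
  rcases h with rfl|rfl|rfl|rfl|rfl|rfl|rfl|rfl|rfl|rfl <;> exact ⟨by decide, by decide⟩

theorem pvDigit_pred {c : Char} (h : pvIsDigit c) (hne : c ≠ '0') :
    ¬ pvDigitVal c - 1 < 0 := by
  unfold pvIsDigit at h
  simp only [List.mem_cons, List.not_mem_nil, or_false] at h
  rcases h with rfl|rfl|rfl|rfl|rfl|rfl|rfl|rfl|rfl|rfl
  · exact absurd rfl hne
  all_goals decide

-- A's loop, runover = false, all indices ≥ 1: copies the remaining digits unchanged
theorem pvA_copy (cs : List Char) : ∀ (acc : List Char) (s : Int), 1 ≤ s →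
    (∀ c ∈ cs, pvIsDigit c) →
    (PySem.List.enumerate cs s).foldl pvAStep (acc, false) = (acc ++ cs, false) := by
  induction cs with
  | nil => intro acc s _ _; simp [PySem.List.enumerate_nil]
  | cons c rest ih =>
    intro acc s hs hd
    have hc : pvIsDigit c := hd c (by simp)
    have hs0 : ¬ s = 0 := by omega
    rw [PySem.List.enumerate_cons, List.foldl_cons]
    have hstep : pvAStep (acc, false) (s, c) = (acc ++ [c], false) := by
      simp only [pvAStep, hs0, Bool.false_or, decide_eq_true_eq, if_false,
        (pvDigit_roundtrip hc).2, (pvDigit_roundtrip hc).1]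
    rw [hstep, ih (acc ++ [c]) (s + 1) (by omega) (fun x hx => hd x (by simp [hx]))]
    simp

-- A's loop with runover = true (or the initial forced decrement): produces B's construction
theorem pvA_borrow (cs : List Char) : ∀ (acc : List Char) (s : Int), 0 ≤ s →
    (∀ c ∈ cs, pvIsDigit c) →
    (PySem.List.enumerate cs s).foldl pvAStep (acc, true) =
      (acc ++ pvBNew cs, (cs.findIdx? (· ≠ '0')).isNone) := by
  induction cs with
  | nil => intro acc s _ _; simp [PySem.List.enumerate_nil, pvBNew]
  | cons c rest ih =>
    intro acc s hs hd
    have hc : pvIsDigit c := hd c (by simp)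
    rw [PySem.List.enumerate_cons, List.foldl_cons]
    by_cases h0 : c = '0'
    · subst h0
      have hstep : pvAStep (acc, true) (s, '0') = (acc ++ ['2'], true) := by
        simp [pvAStep]; decide
      rw [hstep, ih (acc ++ ['2']) (s + 1) (by omega) (fun x hx => hd x (by simp [hx]))]
      have hfind : ('0' :: rest).findIdx? (· ≠ '0') = (rest.findIdx? (· ≠ '0')).map (· + 1) := by
        simp [List.findIdx?_cons]
      unfold pvBNew
      rw [hfind]
      cases hrest : rest.findIdx? (· ≠ '0') with
      | none => simp [List.replicate_succ]
      | some i => simp [List.replicate_succ]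
    · have hstep : pvAStep (acc, true) (s, c) =
          (acc ++ PySem.Int.toChars (pvDigitVal c - 1), false) := by
        simp only [pvAStep, Bool.true_or, if_true, if_neg (pvDigit_pred hc h0)]
      rw [hstep, pvA_copy rest _ (s + 1) (by omega) (fun x hx => hd x (by simp [hx]))]
      have hfind : ((c :: rest).findIdx? (· ≠ '0')) = some 0 := by
        simp [List.findIdx?_cons, h0]
      unfold pvBNew
      rw [hfind]
      simp

-- The first iteration (index 0) decrements no matter what runover is
theorem pvA_step0 (acc : List Char) (r : Bool) (c : Char) :
    pvAStep (acc, r) (0, c) = pvAStep (acc, true) (0, c) := by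
  simp [pvAStep]

theorem pvA_core (cs : List Char) (hd : ∀ c ∈ cs, pvIsDigit c) :
    ((PySem.List.enumerate cs 0).foldl pvAStep ([], false)).1 = pvBNew cs := by
  cases cs with
  | nil => simp [PySem.List.enumerate_nil, pvBNew]
  | cons c rest =>
    rw [PySem.List.enumerate_cons, List.foldl_cons, pvA_step0, ← List.foldl_cons,
      ← PySem.List.enumerate_cons, pvA_borrow (c :: rest) [] 0 (by omega) hd]
    simp

theorem pvIsZero_eq_all (l : List Char) : ∀ b : Bool,
    l.foldl (fun b c => if c ≠ '0' then false else b) b = (b && l.all (· == '0')) := by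
  induction l with
  | nil => simp
  | cons c rest ih =>
    intro b
    rw [List.foldl_cons, ih, List.all_cons]
    by_cases h : c = '0' <;> simp [h]

-- ===== VERDICT (by name: the statement is the Claim_ definition above) =====
theorem update_operator_key_spec : Claim_equal_update_operator_key := by
  intro old_key _ hpre
  unfold Spec_update_operator_key update_operator_key update_operator_key_alt
  have hd : ∀ c ∈ old_key.toList, pvIsDigit c := by
    intro c hc
    unfold Pre_update_operator_key at hpre
    simpa [pvIsDigit] using (List.all_eq_true.mp hpre) c hc
  simp only [pvA_core old_key.toList hd, pvIsZero_eq_all, Bool.true_and]
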